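-- pv_equiv track=rewrite | github.com/YassineTemessek/Juthoor-Linguistic-Genealogy | Juthoor-ArabicGenome-LV1/scripts/research_factory/axis4/exp_4_3_phonetic_substitution.py | find_single_substitution_pairs
-- ===== SOURCE A (Python) =====
-- from collections import defaultdict
-- from itertools import combinations
--
-- def find_single_substitution_pairs(canonical_roots: list[str]) -> list[tuple[str, str, int]]:
--     by_pattern: dict[str, list[str]] = defaultdict(list)
--     for root in canonical_roots:
--         for idx in range(3):
--             pattern = f"{root[:idx]}*{root[idx+1:]}"
--             by_pattern[pattern].append(root)
--
--     pairs: set[tuple[str, str, int]] = set()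
--     for pattern, roots in by_pattern.items():
--         pos = pattern.index("*")
--         for a, b in combinations(sorted(set(roots)), 2):
--             if sum(x != y for x, y in zip(a, b)) == 1:
--                 pairs.add((a, b, pos))
--     return sorted(pairs)
-- ===== SOURCE B (Python) =====
-- from itertools import combinations
--
--
-- def find_single_substitution_pairs(canonical_roots: list[str]) -> list[tuple[str, str, int]]:
--     roots = sorted(set(canonical_roots))
--     pairs = []
--     for a, b in combinations(roots, 2):
--         if len(a) != len(b):
--             continue
--         diffs = [k for k in range(len(a)) if a[k] != b[k]]
--         if len(diffs) == 1 and diffs[0] < 3: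
--             pairs.append((a, b, diffs[0]))
--     return sorted(pairs)
-- ===== Notes on version B (the rewrite author's own statement) =====
-- stated objective: simpler
-- what changed: Replaced the blank-one-position pattern index (defaultdict grouping, per-group sorted-set combinations, set accumulation) by a direct scan over combinations of the sorted distinct roots, keeping a pair iff the strings have equal length and differ in exactly one position below 3.
-- intended difference: On inputs where some root contains A's sentinel character '*' in a way that collides with the blanked position (a '*' in the common prefix before the substitution index, or a shorter root r with '*' that makes another root look like r+'*' blanked), A returns the sentinel's index as the position or emits a spurious pair of different-length roots; B returns the actual single-substitution pairs with the true differing index, which is the intended output. — e.g. on find_single_substitution_pairs(["a*b", "a*c"]): A returns [("a*b", "a*c", 1)], B returns [("a*b", "a*c", 2)]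
import Mathlib
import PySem

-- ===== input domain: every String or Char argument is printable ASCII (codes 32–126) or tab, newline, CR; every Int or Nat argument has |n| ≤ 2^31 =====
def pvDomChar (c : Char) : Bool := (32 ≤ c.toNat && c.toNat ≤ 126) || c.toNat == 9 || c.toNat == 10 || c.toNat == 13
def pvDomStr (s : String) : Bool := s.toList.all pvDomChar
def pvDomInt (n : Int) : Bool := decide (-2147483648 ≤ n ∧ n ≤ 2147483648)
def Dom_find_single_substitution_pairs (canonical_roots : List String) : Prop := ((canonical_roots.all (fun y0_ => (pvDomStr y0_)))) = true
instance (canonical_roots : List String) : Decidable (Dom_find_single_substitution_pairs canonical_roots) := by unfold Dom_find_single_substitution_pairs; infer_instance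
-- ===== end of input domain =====

-- B replaces A's blank-one-position pattern index (defaultdict + per-group combinations + set) by a
-- direct scan over combinations of the sorted distinct roots (objective: simpler). Where a root contains
-- A's sentinel '*' in a colliding way, A's answer is an artefact; B returns the intended value (see D_).

-- ===== PORT A =====
-- shared by both ports: Python's sorted() on (str,str,int) triples = insertion sort by Python's
-- lexicographic tuple order (the foldl/insertBy shape of PySem.List.sorted, with a tuple comparator);
-- exact: Python compares such tuples componentwise, strings by code points (= '<' on .toList,
-- kernel-reducible), ints numerically.
def pvTripLt (x y : String × String × Int) : Bool :=
  x.1.toList < y.1.toList || (x.1 == y.1 && (x.2.1.toList < y.2.1.toList || (x.2.1 == y.2.1 && x.2.2 < y.2.2)))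

def pvSortTriples (l : List (String × String × Int)) : List (String × String × Int) :=
  l.foldl (fun acc x => PySem.List.insertBy pvTripLt x acc) []

-- f"{root[:idx]}*{root[idx+1:]}" : slices via PySem.List.slice; the f-string concatenation is
-- appending the code-point lists (exact).
def pvBlankA (root : String) (idx : Int) : String :=
  String.ofList (PySem.List.slice root.toList none (some idx) ++ '*' :: PySem.List.slice root.toList (some (idx + 1)) none)

-- by_pattern: defaultdict(list) with by_pattern[pattern].append(root)
def pvByPattern (canonical_roots : List String) : PySem.Dict String (List String) :=
  canonical_roots.foldl
    (fun d root =>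
      (PySem.List.pyRange 0 3).foldl (fun d idx => d.modify (pvBlankA root idx) [] (fun v => v ++ [root])) d)
    PySem.Dict.empty

-- sum(x != y for x, y in zip(a, b))
def pvHamA (a b : String) : Int :=
  ((a.toList.zip b.toList).map (fun xy => if xy.1 ≠ xy.2 then (1 : Int) else 0)).sum

-- the body of the inner 'for a, b in combinations(...)' loop of A
def pvAddPairA (pos : Int) (pairs : PySem.Set (String × String × Int)) (c : List String) :
    PySem.Set (String × String × Int) :=
  match c with
  | [a, b] => if pvHamA a b = 1 then PySem.Set.add pairs (a, b, pos) else pairs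
  | _ => pairs

def find_single_substitution_pairs (canonical_roots : List String) : List (String × String × Int) :=
  let by_pattern := pvByPattern canonical_roots
  let pairs : PySem.Set (String × String × Int) :=
    by_pattern.items.foldl
      (fun pairs item =>
        -- pattern.index("*"): exact via Str.find, every pattern contains '*' so no ValueError
        let pos : Int := PySem.Str.find item.1 "*"
        -- sorted(set(roots)): Python's string sort = sort by the code-point list
        (PySem.List.combinations (PySem.List.sorted (PySem.Set.ofList item.2) (fun x => x.toList)) 2).foldl
          (pvAddPairA pos) pairs)
      PySem.Set.empty
  pvSortTriples pairs

-- ===== PORT B =====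
-- B's copy of Python's sorted() on (str,str,int) triples (same builtin; each port carries its own helper)
def pvTripLtB (x y : String × String × Int) : Bool :=
  x.1.toList < y.1.toList || (x.1 == y.1 && (x.2.1.toList < y.2.1.toList || (x.2.1 == y.2.1 && x.2.2 < y.2.2)))

def pvSortTriplesB (l : List (String × String × Int)) : List (String × String × Int) :=
  l.foldl (fun acc x => PySem.List.insertBy pvTripLtB x acc) []

-- diffs = [k for k in range(len(a)) if a[k] != b[k]]  (only evaluated when len(a) == len(b))
def pvDiffsB (la lb : List Char) : List Nat :=
  (List.range la.length).filter (fun k => la.getD k ' ' ≠ lb.getD k ' ')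

def find_single_substitution_pairs_alt (canonical_roots : List String) : List (String × String × Int) :=
  let roots := PySem.List.sorted (PySem.Set.ofList canonical_roots) (fun x => x.toList)
  let pairs : List (String × String × Int) :=
    (PySem.List.combinations roots 2).foldl
      (fun acc c =>
        match c with
        | [a, b] =>
          if PySem.Str.len a ≠ PySem.Str.len b then acc
          else
            match pvDiffsB a.toList b.toList with
            | [k] => if k < 3 then acc ++ [(a, b, (k : Int))] else acc
            | _ => acc
        | _ => acc)
      []
  pvSortTriplesB pairs

-- ===== PRECONDITION & SPEC =====
-- On inputs where some root contains A's sentinel '*' in a colliding way, A returns the sentinel's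
-- index instead of the substitution index ('*' in the common prefix before the differing position) or a
-- spurious pair of different-length roots (a short root r with '*' making another root look like a
-- blanked r); B returns the true single-substitution pairs with the actual differing index, which is
-- the intended output.
-- positions (below 3) where the two roots' overlapping characters differ
def pvMismD (a b : String) : List Nat :=
  (List.range (min a.toList.length b.toList.length)).filter
    (fun m => a.toList.getD m ' ' ≠ b.toList.getD m ' ')

def D_find_single_substitution_pairs (canonical_roots : List String) : Prop :=
  ∃ a ∈ canonical_roots, ∃ b ∈ canonical_roots, ∃ δ ∈ pvMismD a b,
    pvMismD a b = [δ] ∧ δ < 3 ∧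
      ((a.toList.length = b.toList.length ∧ '*' ∈ a.toList.take δ) ∨
       (b.toList.length = a.toList.length + 1 ∧ a.toList.length ≤ 2 ∧
         a.toList.getD δ ' ' = '*' ∧ b.toList.getD a.toList.length ' ' = '*'))

instance (canonical_roots : List String) : Decidable (D_find_single_substitution_pairs canonical_roots) := by
  unfold D_find_single_substitution_pairs; infer_instance

def Spec_find_single_substitution_pairs (canonical_roots : List String) (out : List (String × String × Int)) : Prop :=
  ¬ D_find_single_substitution_pairs canonical_roots → out = find_single_substitution_pairs_alt canonical_roots
instance (canonical_roots : List String) (out : List (String × String × Int)) : Decidable (Spec_find_single_substitution_pairs canonical_roots out) := by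
  unfold Spec_find_single_substitution_pairs; infer_instance

def pvDiffWitness_find_single_substitution_pairs : List String := ["a*b", "a*c"]
def pvDiffWitnessOut_find_single_substitution_pairs :
    (List (String × String × Int)) × (List (String × String × Int)) :=
  ([("a*b", "a*c", 1)], [("a*b", "a*c", 2)])

-- ===== CLAIM (what is proved, stated in full; the proofs are below) =====
def Claim_unchanged_find_single_substitution_pairs : Prop := ∀ (canonical_roots : List String), Dom_find_single_substitution_pairs canonical_roots → Spec_find_single_substitution_pairs canonical_roots (find_single_substitution_pairs canonical_roots)
def Claim_changed_find_single_substitution_pairs : Prop := Dom_find_single_substitution_pairs (pvDiffWitness_find_single_substitution_pairs) ∧ D_find_single_substitution_pairs (pvDiffWitness_find_single_substitution_pairs) ∧ find_single_substitution_pairs (pvDiffWitness_find_single_substitution_pairs) = pvDiffWitnessOut_find_single_substitution_pairs.1 ∧ find_single_substitution_pairs_alt (pvDiffWitness_find_single_substitution_pairs) = pvDiffWitnessOut_find_single_substitution_pairs.2 ∧ pvDiffWitnessOut_find_single_substitution_pairs.1 ≠ pvDiffWitnessOut_find_single_substitution_pairs.2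

-- ===== LEMMAS AND PROOFS =====

-- proof-side abbreviations
def pvPosAnom (la lb : List Char) : Prop :=
  la.length = lb.length ∧ ∃ δ, δ < 3 ∧ δ < la.length ∧ la.take δ = lb.take δ ∧
    la.drop (δ + 1) = lb.drop (δ + 1) ∧ la.getD δ ' ' ≠ lb.getD δ ' ' ∧ '*' ∈ la.take δ

def pvSpur (s t : List Char) : Prop :=
  s.length ≤ 2 ∧ t.length = s.length + 1 ∧ t.getD s.length ' ' = '*' ∧
  ∃ i, i < s.length ∧ s.getD i ' ' = '*' ∧ t.getD i ' ' ≠ '*' ∧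
    ∀ m, m < s.length → m ≠ i → s.getD m ' ' = t.getD m ' '

def pvBlankC (l : List Char) (i : Nat) : List Char := l.take i ++ '*' :: l.drop (i + 1)

def pvLK (roots : List String) : List (String × String) :=
  roots.flatMap (fun r => [(pvBlankA r 0, r), (pvBlankA r 1, r), (pvBlankA r 2, r)])

def pvGroup (roots : List String) (k : String) : List String := (pvByPattern roots).getD k []

def pvSA (canonical_roots : List String) : PySem.Set (String × String × Int) :=
  (pvByPattern canonical_roots).items.foldl
    (fun pairs item =>
      let pos : Int := PySem.Str.find item.1 "*"
      (PySem.List.combinations (PySem.List.sorted (PySem.Set.ofList item.2) (fun x => x.toList)) 2).foldl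
        (pvAddPairA pos) pairs)
    PySem.Set.empty

def pvEmitB (c : List String) : List (String × String × Int) :=
  match c with
  | [a, b] =>
    if PySem.Str.len a ≠ PySem.Str.len b then []
    else
      match pvDiffsB a.toList b.toList with
      | [k] => if k < 3 then [(a, b, (k : Int))] else []
      | _ => []
  | _ => []

def pvSR (roots : List String) : List String :=
  PySem.List.sorted (PySem.Set.ofList roots) (fun x => x.toList)

def pvLB (roots : List String) : List (String × String × Int) :=
  (PySem.List.combinations (pvSR roots) 2).flatMap pvEmitB

def pvLexKey (t : String × String × Int) : List Char ×ₗ (List Char ×ₗ Int) :=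
  toLex (t.1.toList, toLex (t.2.1.toList, t.2.2))

def pvMism (la lb : List Char) : List Nat :=
  (List.range (min la.length lb.length)).filter (fun m => la.getD m ' ' ≠ lb.getD m ' ')

def pvHamN (la lb : List Char) : Nat := ((la.zip lb).filter (fun p => p.1 ≠ p.2)).length

def pvRlt (a b : String) : Prop := a.toList < b.toList

-- ---- sorting bridge ----
lemma pvTripLt_eq (a b : String × String × Int) : pvTripLt a b = decide (pvLexKey a < pvLexKey b) := by
  rcases a with ⟨a1, a2, a3⟩; rcases b with ⟨b1, b2, b3⟩
  apply Bool.eq_iff_iff.mpr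
  simp [pvTripLt, pvLexKey, Prod.Lex.lt_iff, ← String.toList_inj]

lemma pvLexKey_injective : Function.Injective pvLexKey := by
  intro x y h
  rcases x with ⟨a1, a2, a3⟩; rcases y with ⟨b1, b2, b3⟩
  simp only [pvLexKey, toLex_inj, Prod.mk.injEq, String.toList_inj] at h
  obtain ⟨h1, h2, h3⟩ := h
  simp [h1, h2, h3]

def pvLe (x y : String × String × Int) : Prop := pvTripLt y x = false

lemma pvTripLt_asymm {x y : String × String × Int} (h : pvTripLt x y = true) : pvTripLt y x = false := by
  rw [pvTripLt_eq] at h ⊢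
  simp only [decide_eq_true_eq] at h
  simpa using not_lt_of_gt h

lemma pvTripLt_trans {x y z : String × String × Int} (h1 : pvTripLt x y = true)
    (h2 : pvTripLt y z = true) : pvTripLt x z = true := by
  rw [pvTripLt_eq] at h1 h2 ⊢
  simp only [decide_eq_true_eq] at h1 h2 ⊢
  exact lt_trans h1 h2

lemma pvLe_antisymm {x y : String × String × Int} (h1 : pvLe x y) (h2 : pvLe y x) : x = y := by
  unfold pvLe at h1 h2
  rw [pvTripLt_eq] at h1 h2
  simp only [decide_eq_false_iff_not, not_lt] at h1 h2
  exact pvLexKey_injective (le_antisymm h1 h2)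

lemma pvInsertBy_perm (x : String × String × Int) (ys : List (String × String × Int)) :
    (PySem.List.insertBy pvTripLt x ys).Perm (x :: ys) := by
  induction ys with
  | nil => simp [PySem.List.insertBy]
  | cons y ys ih =>
    rw [PySem.List.insertBy]
    split
    · exact List.Perm.refl _
    · exact (ih.cons y).trans (List.Perm.swap x y ys)

lemma pvInsertBy_pairwise (x : String × String × Int) (ys : List (String × String × Int))
    (hp : ys.Pairwise pvLe) : (PySem.List.insertBy pvTripLt x ys).Pairwise pvLe := by
  induction ys with
  | nil => simp [PySem.List.insertBy, List.pairwise_cons]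
  | cons y ys ih =>
    rw [PySem.List.insertBy]
    rw [List.pairwise_cons] at hp
    split
    · rename_i hlt
      rw [List.pairwise_cons]
      refine ⟨?_, List.pairwise_cons.mpr hp⟩
      intro z hz
      rcases List.mem_cons.mp hz with rfl | hz'
      · exact pvTripLt_asymm hlt
      · unfold pvLe
        by_contra hzx
        have : pvTripLt z x = true := by
          cases hzz : pvTripLt z x
          · exact absurd hzz hzx
          · rfl
        exact absurd (hp.1 z hz') (by simp [pvLe, pvTripLt_trans this hlt])
    · rename_i hnlt
      rw [List.pairwise_cons]
      refine ⟨?_, ih hp.2⟩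
      intro z hz
      rcases (PySem.List.mem_insertBy _ _ _ _).mp hz with rfl | hz'
      · exact (Bool.not_eq_true _).mp hnlt
      · exact hp.1 z hz'

lemma pvSortTriples_perm (l : List (String × String × Int)) : (pvSortTriples l).Perm l := by
  have aux : ∀ (acc : List (String × String × Int)),
      (l.foldl (fun acc x => PySem.List.insertBy pvTripLt x acc) acc).Perm (acc ++ l) := by
    induction l with
    | nil => intro acc; simp
    | cons x l ih =>
      intro acc
      rw [List.foldl_cons]
      exact (ih _).trans (((pvInsertBy_perm x acc).append_right l).trans List.perm_middle.symm)
  simpa using aux []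

lemma pvSortTriples_pairwise (l : List (String × String × Int)) : (pvSortTriples l).Pairwise pvLe := by
  have aux : ∀ (acc : List (String × String × Int)), acc.Pairwise pvLe →
      (l.foldl (fun acc x => PySem.List.insertBy pvTripLt x acc) acc).Pairwise pvLe := by
    induction l with
    | nil => intro acc h; simpa using h
    | cons x l ih => intro acc h; rw [List.foldl_cons]; exact ih _ (pvInsertBy_pairwise x acc h)
  exact aux [] (List.Pairwise.nil)

lemma pvSortTriples_congr_perm {l1 l2 : List (String × String × Int)} (h : l1.Perm l2) :
    pvSortTriples l1 = pvSortTriples l2 := by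
  refine List.Perm.eq_of_pairwise (le := pvLe) (fun a b _ _ hab hba => pvLe_antisymm hab hba)
    (pvSortTriples_pairwise l1) (pvSortTriples_pairwise l2) ?_
  exact (pvSortTriples_perm l1).trans (h.trans (pvSortTriples_perm l2).symm)

-- ---- generic fold lemmas ----
lemma pvMemFoldl {α β : Type} (l : List α) (F : List β → α → List β) (C : α → β → Prop)
    (h : ∀ s x, x ∈ l → ∀ y, y ∈ F s x ↔ y ∈ s ∨ C x y) :
    ∀ (s0 : List β) (y : β), y ∈ l.foldl F s0 ↔ y ∈ s0 ∨ ∃ x ∈ l, C x y := by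
  induction l with
  | nil => intro s0 y; simp
  | cons x l ih =>
    intro s0 y
    rw [List.foldl_cons]
    rw [ih (fun s x' hx' => h s x' (List.mem_cons_of_mem _ hx')) (F s0 x) y]
    rw [h s0 x (List.mem_cons_self) y]
    simp only [List.mem_cons]
    constructor
    · rintro ((hy | hy) | ⟨x', hx', hc⟩)
      · exact Or.inl hy
      · exact Or.inr ⟨x, Or.inl rfl, hy⟩
      · exact Or.inr ⟨x', Or.inr hx', hc⟩
    · rintro (hy | ⟨x', (rfl | hx'), hc⟩)
      · exact Or.inl (Or.inl hy)
      · exact Or.inl (Or.inr hc)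
      · exact Or.inr ⟨x', hx', hc⟩

lemma pvNodupFoldl {α β : Type} (l : List α) (F : List β → α → List β)
    (h : ∀ s x, s.Nodup → (F s x).Nodup) :
    ∀ (s0 : List β), s0.Nodup → (l.foldl F s0).Nodup := by
  induction l with
  | nil => intro s0 hs; simpa using hs
  | cons x l ih => intro s0 hs; rw [List.foldl_cons]; exact ih (F s0 x) (h s0 x hs)

-- ---- pattern dict characterization ----
lemma pvByPattern_eq_flat (roots : List String) :
    pvByPattern roots =
      (pvLK roots).foldl (fun d p => d.modify p.1 [] (fun v => v ++ [p.2])) PySem.Dict.empty := by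
  have hr : PySem.List.pyRange 0 3 = [0, 1, 2] := by decide
  unfold pvByPattern pvLK
  rw [hr]
  generalize PySem.Dict.empty = d
  induction roots generalizing d with
  | nil => rfl
  | cons r roots ih =>
    rw [List.foldl_cons, List.flatMap_cons, List.foldl_append]
    exact ih _

lemma pvGroup_eq (roots : List String) (k : String) :
    pvGroup roots k = ((pvLK roots).filter (fun p => p.1 == k)).map (·.2) := by
  unfold pvGroup
  rw [pvByPattern_eq_flat, PySem.Dict.getD_foldl_modify_append, PySem.Dict.getD_empty]
  simp

lemma pvMem_LK (roots : List String) (p : String × String) :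
    p ∈ pvLK roots ↔ ∃ r ∈ roots, ∃ i : Nat, i < 3 ∧ p = (pvBlankA r (i : Int), r) := by
  unfold pvLK
  rw [List.mem_flatMap]
  constructor
  · rintro ⟨r, hr, hp⟩
    simp only [List.mem_cons, List.not_mem_nil, or_false] at hp
    rcases hp with rfl | rfl | rfl
    · exact ⟨r, hr, 0, by norm_num⟩
    · exact ⟨r, hr, 1, by norm_num⟩
    · exact ⟨r, hr, 2, by norm_num⟩
  · rintro ⟨r, hr, i, hi, rfl⟩
    refine ⟨r, hr, ?_⟩
    interval_cases i <;> simp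

lemma pvMem_group (roots : List String) (k r : String) :
    r ∈ pvGroup roots k ↔ r ∈ roots ∧ ∃ i : Nat, i < 3 ∧ pvBlankA r (i : Int) = k := by
  rw [pvGroup_eq]
  simp only [List.mem_map, List.mem_filter]
  constructor
  · rintro ⟨p, ⟨hpLK, hpk⟩, rfl⟩
    rw [pvMem_LK] at hpLK
    obtain ⟨r', hr', i, hi, rfl⟩ := hpLK
    simp only [beq_iff_eq] at hpk
    exact ⟨hr', i, hi, hpk⟩
  · rintro ⟨hr, i, hi, hk⟩
    exact ⟨(pvBlankA r (i : Int), r), ⟨(pvMem_LK roots _).mpr ⟨r, hr, i, hi, rfl⟩, by simp [hk]⟩, rfl⟩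

lemma pvKeys_byPattern (roots : List String) :
    (pvByPattern roots).keys = PySem.Set.ofList ((pvLK roots).map (·.1)) := by
  rw [pvByPattern_eq_flat]
  rw [PySem.Dict.keys_foldl_modify_key (pvLK roots) (·.1) [] (fun _ p => (fun v => v ++ [p.2]))]
  rw [PySem.Dict.keys_empty]
  exact PySem.Set.update_empty _

lemma pvNodupKeys_byPattern (roots : List String) : (pvByPattern roots).keys.Nodup := by
  rw [pvKeys_byPattern]; exact PySem.Set.nodup_ofList _

lemma pvItems_byPattern (roots : List String) :
    (pvByPattern roots).items = (pvByPattern roots).keys.map (fun k => (k, pvGroup roots k)) := by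
  exact PySem.Dict.items_eq_map_keys _ (pvNodupKeys_byPattern roots) []

-- ---- combinations of a strictly sorted list ----
lemma pvPairSublist {l : List String} (hs : l.Pairwise pvRlt) (a b : String) :
    [a, b].Sublist l ↔ a ∈ l ∧ b ∈ l ∧ pvRlt a b := by
  constructor
  · intro h
    exact ⟨h.subset (by simp), h.subset (by simp),
      List.pairwise_iff_forall_sublist.mp hs h⟩
  · rintro ⟨ha, hb, hab⟩
    induction l with
    | nil => simp at ha
    | cons x l ih =>
      rcases List.mem_cons.mp ha with rfl | ha'
      · have hb' : b ∈ l := by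
          rcases List.mem_cons.mp hb with rfl | h'
          · exact absurd hab (lt_irrefl _)
          · exact h'
        exact List.cons_sublist_cons.mpr (List.singleton_sublist.mpr hb')
      · have hb' : b ∈ l := by
          rcases List.mem_cons.mp hb with rfl | h'
          · have hxa : pvRlt b a := (List.pairwise_cons.mp hs).1 a ha'
            exact absurd (lt_trans hab hxa) (lt_irrefl _)
          · exact h'
        exact (ih (List.pairwise_cons.mp hs).2 ha' hb').cons x
  
lemma pvMem_comb2 {l : List String} (hs : l.Pairwise pvRlt) (c : List String) :
    c ∈ PySem.List.combinations l 2 ↔ ∃ a b, c = [a, b] ∧ a ∈ l ∧ b ∈ l ∧ pvRlt a b := by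
  rw [PySem.List.mem_combinations_iff]
  constructor
  · rintro ⟨hsl, hlen⟩
    match c, hlen with
    | [a, b], _ =>
      exact ⟨a, b, rfl, ((pvPairSublist hs a b).mp hsl).1, ((pvPairSublist hs a b).mp hsl).2.1,
        ((pvPairSublist hs a b).mp hsl).2.2⟩
  · rintro ⟨a, b, rfl, ha, hb, hab⟩
    exact ⟨(pvPairSublist hs a b).mpr ⟨ha, hb, hab⟩, rfl⟩

lemma pvNodup_combinations {α : Type} {l : List α} (h : l.Nodup) (r : Nat) :
    (PySem.List.combinations l r).Nodup := by
  induction l generalizing r with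
  | nil =>
    cases r with
    | zero => simp [PySem.List.combinations_zero]
    | succ r => simp [PySem.List.combinations_nil_succ]
  | cons x l ih =>
    cases r with
    | zero => simp [PySem.List.combinations_zero]
    | succ r =>
      rw [PySem.List.combinations_cons_succ]
      have hx : x ∉ l := (List.nodup_cons.mp h).1
      have hl : l.Nodup := (List.nodup_cons.mp h).2
      apply List.Nodup.append
      · exact (ih hl r).map (fun c c' hcc => by simpa using hcc)
      · exact ih hl (r + 1)
      · intro c hc1 hc2
        obtain ⟨c', _, rfl⟩ := List.mem_map.mp hc1
        have := (PySem.List.mem_combinations_iff _ _ _).mp hc2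
        exact hx (this.1.subset (by simp))

-- ---- the strictly sorted root lists ----
lemma pvSortedInst (d1 d2 : DecidableLT (List Char)) (xs : List String) (key : String → List Char) :
    @PySem.List.sorted String (List Char) _ d1 xs key false
      = @PySem.List.sorted String (List Char) _ d2 xs key false := by
  have : d1 = d2 := by funext a b; exact Subsingleton.elim _ _
  rw [this]

lemma pvSortedSet_pairwise (xs : List String) :
    (PySem.List.sorted (PySem.Set.ofList xs) (fun x => x.toList)).Pairwise pvRlt := by
  have h1 : (PySem.List.sorted (PySem.Set.ofList xs) (fun x => x.toList)).Pairwise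
      (fun a b : String => a.toList ≤ b.toList) := by
    rw [pvSortedInst _ (@LinearOrder.toDecidableLT (List Char) _)]
    exact PySem.List.sorted_pairwise _ _
  have h2 : (PySem.List.sorted (PySem.Set.ofList xs) (fun x => x.toList)).Nodup :=
    (PySem.Set.nodup_ofList xs).perm (PySem.List.sorted_perm _ _ _).symm
  refine (h1.and h2).imp ?_
  rintro a b ⟨hle, hne⟩
  exact lt_of_le_of_ne hle (fun hh => hne (String.toList_inj.mp hh))

lemma pvSR_pairwise (roots : List String) : (pvSR roots).Pairwise pvRlt :=
  pvSortedSet_pairwise roots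

lemma pvMem_SR (roots : List String) (x : String) : x ∈ pvSR roots ↔ x ∈ roots := by
  unfold pvSR
  rw [PySem.List.mem_sorted, PySem.Set.mem_ofList]

-- ---- membership characterizations of the two collected pair lists ----
lemma pvMem_keys (roots : List String) (k : String) :
    k ∈ (pvByPattern roots).keys ↔ ∃ r ∈ roots, ∃ i : Nat, i < 3 ∧ pvBlankA r (i : Int) = k := by
  rw [pvKeys_byPattern, PySem.Set.mem_ofList, List.mem_map]
  constructor
  · rintro ⟨p, hp, rfl⟩
    obtain ⟨r, hr, i, hi, rfl⟩ := (pvMem_LK roots p).mp hp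
    exact ⟨r, hr, i, hi, rfl⟩
  · rintro ⟨r, hr, i, hi, rfl⟩
    exact ⟨(pvBlankA r (i : Int), r), (pvMem_LK roots _).mpr ⟨r, hr, i, hi, rfl⟩, rfl⟩

lemma pvInnerMem (k : String) (gs : List String) (s : List (String × String × Int))
    (t : String × String × Int) :
    t ∈ (PySem.List.combinations (PySem.List.sorted (PySem.Set.ofList gs) (fun x => x.toList)) 2).foldl
        (pvAddPairA (PySem.Str.find k "*")) s
      ↔ t ∈ s ∨ ∃ a b, a ∈ gs ∧ b ∈ gs ∧ pvRlt a b ∧ pvHamA a b = 1 ∧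
          t = (a, b, PySem.Str.find k "*") := by
  rw [pvMemFoldl _ _
    (fun c y => ∃ a b, c = [a, b] ∧ pvHamA a b = 1 ∧ y = (a, b, PySem.Str.find k "*")) ?hh s t]
  case hh =>
    intro s' c _ y
    rcases c with _ | ⟨a, _ | ⟨b, _ | rest⟩⟩
    · simp [pvAddPairA]
    · simp [pvAddPairA]
    · show y ∈ (if pvHamA a b = 1 then PySem.Set.add s' (a, b, PySem.Str.find k "*") else s') ↔ _
      split
      · rename_i hham
        rw [PySem.Set.mem_add]
        constructor
        · rintro (hy | rfl)
          · exact Or.inl hy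
          · exact Or.inr ⟨a, b, rfl, hham, rfl⟩
        · rintro (hy | ⟨a', b', he, hham', rfl⟩)
          · exact Or.inl hy
          · injection he with h1 h2
            injection h2 with h2 _
            subst h1; subst h2
            exact Or.inr rfl
      · rename_i hham
        constructor
        · exact fun hy => Or.inl hy
        · rintro (hy | ⟨a', b', he, hham', rfl⟩)
          · exact hy
          · injection he with h1 h2
            injection h2 with h2 _
            subst h1; subst h2
            exact absurd hham' hham
    · simp [pvAddPairA]
  constructor
  · rintro (hy | ⟨c, hc, a, b, rfl, hham, rfl⟩)
    · exact Or.inl hy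
    · obtain ⟨a', b', he, ha, hb, hab⟩ := (pvMem_comb2 (pvSortedSet_pairwise gs) _).mp hc
      injection he with h1 h2
      injection h2 with h2 _
      subst h1; subst h2
      rw [PySem.List.mem_sorted, PySem.Set.mem_ofList] at ha hb
      exact Or.inr ⟨_, _, ha, hb, hab, hham, rfl⟩
  · rintro (hy | ⟨a, b, ha, hb, hab, hham, rfl⟩)
    · exact Or.inl hy
    · refine Or.inr ⟨[a, b], (pvMem_comb2 (pvSortedSet_pairwise gs) _).mpr
        ⟨a, b, rfl, ?_, ?_, hab⟩, a, b, rfl, hham, rfl⟩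
      · rw [PySem.List.mem_sorted, PySem.Set.mem_ofList]; exact ha
      · rw [PySem.List.mem_sorted, PySem.Set.mem_ofList]; exact hb

lemma pvMem_SA (roots : List String) (t : String × String × Int) :
    t ∈ pvSA roots ↔
      ∃ a b k, a ∈ roots ∧ b ∈ roots ∧
        (∃ i : Nat, i < 3 ∧ pvBlankA a (i : Int) = k) ∧ (∃ j : Nat, j < 3 ∧ pvBlankA b (j : Int) = k) ∧
        pvRlt a b ∧ pvHamA a b = 1 ∧ t = (a, b, PySem.Str.find k "*") := by
  unfold pvSA
  rw [pvMemFoldl _ _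
    (fun item y => ∃ a b, a ∈ item.2 ∧ b ∈ item.2 ∧ pvRlt a b ∧ pvHamA a b = 1 ∧
      y = (a, b, PySem.Str.find item.1 "*")) ?hh _ t]
  case hh =>
    intro s item _ y
    exact pvInnerMem item.1 item.2 s y
  have hempty : t ∉ (PySem.Set.empty : PySem.Set (String × String × Int)) := List.not_mem_nil
  constructor
  · rintro (hy | ⟨item, hitem, a, b, ha, hb, hab, hham, rfl⟩)
    · exact absurd hy hempty
    · rw [pvItems_byPattern] at hitem
      obtain ⟨k, hk, rfl⟩ := List.mem_map.mp hitem
      rw [pvMem_group] at ha hb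
      exact ⟨a, b, k, ha.1, hb.1, ha.2, hb.2, hab, hham, rfl⟩
  · rintro ⟨a, b, k, ha, hb, ⟨i, hi, hik⟩, ⟨j, hj, hjk⟩, hab, hham, rfl⟩
    refine Or.inr ⟨(k, pvGroup roots k), ?_, a, b, ?_, ?_, hab, hham, rfl⟩
    · rw [pvItems_byPattern]
      exact List.mem_map.mpr ⟨k, (pvMem_keys roots k).mpr ⟨a, ha, i, hi, hik⟩, rfl⟩
    · exact (pvMem_group roots k a).mpr ⟨ha, i, hi, hik⟩
    · exact (pvMem_group roots k b).mpr ⟨hb, j, hj, hjk⟩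

lemma pvStrLenEq (a b : String) : (PySem.Str.len a = PySem.Str.len b) ↔ a.toList.length = b.toList.length := by
  rw [PySem.Str.len_eq, PySem.Str.len_eq]
  exact_mod_cast Iff.rfl

lemma pvMem_emitB (a b : String) (t : String × String × Int) :
    t ∈ pvEmitB [a, b] ↔
      ∃ δ, a.toList.length = b.toList.length ∧ pvDiffsB a.toList b.toList = [δ] ∧ δ < 3 ∧
        t = (a, b, (δ : Int)) := by
  simp only [pvEmitB]
  constructor
  · intro ht
    split at ht
    · simp at ht
    · rename_i hlen
      have hlen' : a.toList.length = b.toList.length := (pvStrLenEq a b).mp (not_not.mp hlen)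
      split at ht
      · rename_i δ hd
        split at ht
        · rename_i hδ
          rw [List.mem_singleton] at ht
          exact ⟨δ, hlen', hd, hδ, ht⟩
        · simp at ht
      · simp at ht
  · rintro ⟨δ, hlen, hd, hδ, rfl⟩
    rw [if_neg (not_not.mpr ((pvStrLenEq a b).mpr hlen)), hd]
    simp [hδ]

lemma pvMem_LB (roots : List String) (t : String × String × Int) :
    t ∈ pvLB roots ↔
      ∃ a b δ, a ∈ roots ∧ b ∈ roots ∧ pvRlt a b ∧
        a.toList.length = b.toList.length ∧ pvDiffsB a.toList b.toList = [δ] ∧ δ < 3 ∧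
        t = (a, b, (δ : Int)) := by
  unfold pvLB
  rw [List.mem_flatMap]
  constructor
  · rintro ⟨c, hc, ht⟩
    obtain ⟨a, b, rfl, ha, hb, hab⟩ := (pvMem_comb2 (pvSR_pairwise roots) c).mp hc
    obtain ⟨δ, h1, h2, h3, h4⟩ := (pvMem_emitB a b t).mp ht
    exact ⟨a, b, δ, (pvMem_SR roots a).mp ha, (pvMem_SR roots b).mp hb, hab, h1, h2, h3, h4⟩
  · rintro ⟨a, b, δ, ha, hb, hab, h1, h2, h3, h4⟩
    refine ⟨[a, b], (pvMem_comb2 (pvSR_pairwise roots) _).mpr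
      ⟨a, b, rfl, (pvMem_SR roots a).mpr ha, (pvMem_SR roots b).mpr hb, hab⟩, ?_⟩
    exact (pvMem_emitB a b t).mpr ⟨δ, h1, h2, h3, h4⟩

lemma pvNodup_SA (roots : List String) : (pvSA roots).Nodup := by
  unfold pvSA
  refine pvNodupFoldl _ _ ?_ _ List.nodup_nil
  intro s item hs
  refine pvNodupFoldl _ _ ?_ s hs
  intro s2 c hs2
  rcases c with _ | ⟨a, _ | ⟨b, _ | rest⟩⟩
  · exact hs2
  · exact hs2
  · show (if pvHamA a b = 1 then PySem.Set.add s2 (a, b, PySem.Str.find item.1 "*") else s2).Nodup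
    split
    · exact PySem.Set.nodup_add _ _ hs2
    · exact hs2
  · exact hs2

lemma pvNodupFlatMap {α β : Type} (l : List α) (f : α → List β) (g : β → α) (hl : l.Nodup)
    (hdet : ∀ c t, t ∈ f c → g t = c) (hone : ∀ c, (f c).Nodup) : (l.flatMap f).Nodup := by
  induction l with
  | nil => simp
  | cons c l ih =>
    rw [List.flatMap_cons]
    rw [List.nodup_cons] at hl
    refine List.Nodup.append (hone c) (ih hl.2) ?_
    intro t ht1 ht2
    obtain ⟨c', hc', ht'⟩ := List.mem_flatMap.mp ht2
    exact hl.1 (by rw [← hdet c t ht1, hdet c' t ht']; exact hc')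

lemma pvNodup_LB (roots : List String) : (pvLB roots).Nodup := by
  unfold pvLB
  have hnd : (pvSR roots).Nodup :=
    (PySem.Set.nodup_ofList roots).perm (PySem.List.sorted_perm _ _ _).symm
  refine pvNodupFlatMap _ _ (fun t => [t.1, t.2.1]) (pvNodup_combinations hnd 2) ?_ ?_
  · intro c t ht
    rcases c with _ | ⟨a, _ | ⟨b, _ | rest⟩⟩ <;> simp only [pvEmitB] at ht
    · simp at ht
    · simp at ht
    · split at ht
      · simp at ht
      · split at ht
        · split at ht
          · rw [List.mem_singleton] at ht; subst ht; rfl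
          · simp at ht
        · simp at ht
    · simp at ht
  · intro c
    rcases c with _ | ⟨a, _ | ⟨b, _ | rest⟩⟩ <;> simp only [pvEmitB]
    · exact List.nodup_nil
    · exact List.nodup_nil
    · split
      · exact List.nodup_nil
      · split
        · split
          · exact List.nodup_singleton _
          · exact List.nodup_nil
        · exact List.nodup_nil
    · exact List.nodup_nil

-- ---- string-level facts ----
lemma pvBlankA_toList (r : String) (i : Nat) : (pvBlankA r (i : Int)).toList = pvBlankC r.toList i := by
  unfold pvBlankA pvBlankC
  rw [String.toList_ofList]
  rw [PySem.List.slice_to _ (Int.natCast_nonneg i)]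
  have h1 : ((i : Int) + 1) = ((i + 1 : Nat) : Int) := by push_cast; ring
  rw [h1, PySem.List.slice_from _ (Int.natCast_nonneg (i + 1))]
  simp

lemma pvBlankC_lt {l : List Char} {i : Nat} (h : i < l.length) : pvBlankC l i = l.set i '*' := by
  rw [List.set_eq_take_append_cons_drop, if_pos h]; rfl

lemma pvBlankC_ge {l : List Char} {i : Nat} (h : l.length ≤ i) : pvBlankC l i = l ++ ['*'] := by
  unfold pvBlankC
  rw [List.take_of_length_le h, List.drop_eq_nil_of_le (le_trans h (Nat.le_succ i))]

lemma pvHamA_eq (a b : String) : pvHamA a b = (pvHamN a.toList b.toList : Int) := by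
  unfold pvHamA pvHamN
  have h : (fun xy : Char × Char => if xy.1 ≠ xy.2 then (1 : Int) else 0)
      = (fun xy : Char × Char => if (fun p : Char × Char => decide (p.1 ≠ p.2)) xy = true then (1 : Int) else 0) := by
    funext xy; simp
  rw [h, PySem.List.sum_map_ite_one_zero, List.countP_eq_length_filter]

lemma pvMism_cons (x y : Char) (la lb : List Char) :
    pvMism (x :: la) (y :: lb) = (if x ≠ y then [0] else []) ++ (pvMism la lb).map (· + 1) := by
  unfold pvMism
  simp only [List.length_cons, Nat.succ_min_succ, List.range_succ_eq_map]
  rw [List.filter_cons, List.filter_map]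
  have h1 : ((fun m => decide ((x :: la).getD m ' ' ≠ (y :: lb).getD m ' ')) ∘ Nat.succ)
      = (fun m => decide (la.getD m ' ' ≠ lb.getD m ' ')) := by
    funext m; simp
  rw [h1]
  have h2 : (fun m => m + 1) = Nat.succ := by funext m; rfl
  rw [h2]
  by_cases hxy : x = y <;> simp [hxy]

lemma pvHamN_eq_mism (la lb : List Char) : pvHamN la lb = (pvMism la lb).length := by
  induction la generalizing lb with
  | nil => simp [pvHamN, pvMism]
  | cons x la ih =>
    cases lb with
    | nil => simp [pvHamN, pvMism]
    | cons y lb =>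
      rw [pvMism_cons]
      unfold pvHamN
      rw [List.zip_cons_cons, List.filter_cons]
      by_cases hxy : x = y <;>
        simp [hxy, ← ih lb, pvHamN]

lemma pvDiffsB_eq_mism (la lb : List Char) (h : la.length = lb.length) :
    pvDiffsB la lb = pvMism la lb := by
  unfold pvDiffsB pvMism
  rw [h, min_self]

lemma pvFilterRangeSingleton (p : Nat → Bool) (n δ : Nat) :
    (List.range n).filter p = [δ] ↔ δ < n ∧ p δ = true ∧ ∀ m, m < n → m ≠ δ → ¬ p m = true := by
  constructor
  · intro h
    have hδ : δ ∈ (List.range n).filter p := by rw [h]; exact List.mem_singleton_self δ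
    rw [List.mem_filter, List.mem_range] at hδ
    refine ⟨hδ.1, hδ.2, ?_⟩
    intro m hm hne hp
    have : m ∈ (List.range n).filter p := List.mem_filter.mpr ⟨List.mem_range.mpr hm, hp⟩
    rw [h, List.mem_singleton] at this
    exact hne this
  · rintro ⟨h1, h2, h3⟩
    have hnd : ((List.range n).filter p).Nodup := List.Nodup.filter p List.nodup_range
    have hmem : ∀ x, x ∈ (List.range n).filter p ↔ x = δ := by
      intro x
      rw [List.mem_filter, List.mem_range]
      constructor
      · rintro ⟨hx, hpx⟩
        by_contra hne
        exact h3 x hx hne hpx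
      · rintro rfl
        exact ⟨h1, h2⟩
    cases hf : (List.range n).filter p with
    | nil => exact absurd ((hmem δ).mpr rfl) (by rw [hf]; simp)
    | cons x rest =>
      have hx : x = δ := (hmem x).mp (by rw [hf]; exact List.mem_cons_self)
      cases hrest : rest with
      | nil => rw [hx]
      | cons y rest2 =>
        have hy : y = δ := (hmem y).mp (by rw [hf, hrest]; simp)
        rw [hf, hrest] at hnd
        rw [List.nodup_cons] at hnd
        exact absurd (by rw [hx, ← hy]; simp : x ∈ y :: rest2) hnd.1

lemma pvFindStarGo (p rest : List Char) (h : '*' ∉ p) :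
    ∀ k : Nat, PySem.Chars.find.go ['*'] (p ++ '*' :: rest) k = ((k + p.length : Nat) : Int) := by
  induction p with
  | nil =>
    intro k
    rw [List.nil_append, PySem.Chars.find.go]
    simp [List.isPrefixOf]
  | cons c p ih =>
    intro k
    have hc : ¬ ('*' = c) := fun hh => h (by rw [hh]; exact List.mem_cons_self)
    rw [List.cons_append, PySem.Chars.find.go]
    have hpre : List.isPrefixOf ['*'] (c :: (p ++ '*' :: rest)) = false := by
      simp [List.isPrefixOf, hc]
    rw [hpre]
    simp only [Bool.false_eq_true, if_false]
    rw [ih (fun hh => h (List.mem_cons_of_mem c hh)) (k + 1)]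
    simp only [List.length_cons]
    push_cast
    ring

lemma pvFindStar (p rest : List Char) (h : '*' ∉ p) :
    PySem.Chars.find (p ++ '*' :: rest) ['*'] = (p.length : Int) := by
  unfold PySem.Chars.find
  rw [pvFindStarGo p rest h 0]
  simp

lemma pvPosOfKey (a : String) (δ : Nat) (hδ : δ ≤ a.toList.length) (h : '*' ∉ a.toList.take δ) :
    PySem.Str.find (pvBlankA a (δ : Int)) "*" = (δ : Int) := by
  rw [PySem.Str.find_eq, pvBlankA_toList]
  have hstar : "*".toList = ['*'] := rfl
  rw [hstar]
  unfold pvBlankC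
  rw [pvFindStar _ _ h]
  rw [List.length_take]
  rw [Nat.min_eq_left hδ]

-- ---- the core analysis: co-occurrence under a pattern key, outside D_ ----
lemma pvHamOne (la lb : List Char) (h : pvHamN la lb = 1) : ∃ δ0, pvMism la lb = [δ0] := by
  rw [pvHamN_eq_mism] at h
  exact List.length_eq_one_iff.mp h

lemma pvMismSingleton (la lb : List Char) (δ : Nat) :
    pvMism la lb = [δ] ↔ δ < min la.length lb.length ∧ la.getD δ ' ' ≠ lb.getD δ ' ' ∧
      ∀ m, m < min la.length lb.length → m ≠ δ → la.getD m ' ' = lb.getD m ' ' := by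
  unfold pvMism
  rw [pvFilterRangeSingleton]
  constructor
  · rintro ⟨h1, h2, h3⟩
    refine ⟨h1, by simpa using h2, ?_⟩
    intro m hm hne
    simpa using h3 m hm hne
  · rintro ⟨h1, h2, h3⟩
    refine ⟨h1, by simpa using h2, ?_⟩
    intro m hm hne
    simpa using h3 m hm hne

lemma pvTakeDropEq (la lb : List Char) (δ : Nat) (hlen : la.length = lb.length)
    (helse : ∀ m, m < la.length → m ≠ δ → la.getD m ' ' = lb.getD m ' ') :
    la.take δ = lb.take δ ∧ la.drop (δ + 1) = lb.drop (δ + 1) := by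
  constructor
  · apply List.ext_getElem (by simp [hlen])
    intro m h1 h2
    rw [List.getElem_take, List.getElem_take]
    have hm1 : m < la.length := by simp [List.length_take] at h1; omega
    have hmδ : m ≠ δ := by simp [List.length_take] at h1; omega
    have := helse m hm1 hmδ
    rwa [List.getD_eq_getElem _ _ hm1, List.getD_eq_getElem _ _ (by omega)] at this
  · apply List.ext_getElem (by simp [hlen])
    intro m h1 h2
    rw [List.getElem_drop, List.getElem_drop]
    have hm1 : δ + 1 + m < la.length := by simp [List.length_drop] at h1; omega
    have := helse _ hm1 (by omega)
    rwa [List.getD_eq_getElem _ _ hm1, List.getD_eq_getElem _ _ (by omega)] at this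

lemma pvBuildPosAnom (la lb : List Char) (δ : Nat) (hlen : la.length = lb.length) (hδ3 : δ < 3)
    (hδl : δ < la.length) (hmis : la.getD δ ' ' ≠ lb.getD δ ' ')
    (helse : ∀ m, m < la.length → m ≠ δ → la.getD m ' ' = lb.getD m ' ')
    (hstar : '*' ∈ la.take δ) : pvPosAnom la lb := by
  obtain ⟨ht, hd⟩ := pvTakeDropEq la lb δ hlen helse
  exact ⟨hlen, δ, hδ3, hδl, ht, hd, hmis, hstar⟩

lemma pvMismD_eq (a b : String) : pvMismD a b = pvMism a.toList b.toList := rfl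

lemma pvElseOfTakeDrop (la lb : List Char) (δ : Nat) (ht : la.take δ = lb.take δ)
    (hd : la.drop (δ + 1) = lb.drop (δ + 1)) (hlen : la.length = lb.length) :
    ∀ m, m < la.length → m ≠ δ → la.getD m ' ' = lb.getD m ' ' := by
  intro m hm hne
  rw [List.getD_eq_getElem _ _ hm, List.getD_eq_getElem _ _ (by omega)]
  rcases Nat.lt_or_ge m δ with hlt | hge
  · have h1 : m < (la.take δ).length := by simp [List.length_take]; omega
    have := List.getElem_of_eq ht h1
    rwa [List.getElem_take, List.getElem_take] at this
  · have hgt : δ + 1 ≤ m := by omega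
    have h1 : m - (δ + 1) < (la.drop (δ + 1)).length := by simp [List.length_drop]; omega
    have := List.getElem_of_eq hd h1
    rw [List.getElem_drop, List.getElem_drop] at this
    have harith : δ + 1 + (m - (δ + 1)) = m := by omega
    simp only [harith] at this
    exact this

lemma pvClauseD (roots : List String) (a b : String) (ha : a ∈ roots) (hb : b ∈ roots)
    (hcl : pvPosAnom a.toList b.toList ∨ pvSpur a.toList b.toList ∨ pvSpur b.toList a.toList) :
    D_find_single_substitution_pairs roots := by
  rcases hcl with ⟨hlen, δ, hδ3, hδl, ht, hd, hne, hstar⟩ | hsp | hsp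
  · have hm : pvMism a.toList b.toList = [δ] := by
      rw [pvMismSingleton]
      exact ⟨by omega, hne, fun m hm hmne => pvElseOfTakeDrop _ _ δ ht hd hlen m (by omega) hmne⟩
    exact ⟨a, ha, b, hb, δ, by rw [pvMismD_eq, hm]; exact List.mem_singleton_self δ,
      by rw [pvMismD_eq]; exact hm, hδ3, Or.inl ⟨hlen, hstar⟩⟩
  · obtain ⟨hs2, hlen, hend, i, hil, hsi, hti, hrest⟩ := hsp
    have hm : pvMism a.toList b.toList = [i] := by
      rw [pvMismSingleton]
      refine ⟨by omega, ?_, ?_⟩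
      · rw [hsi]; exact fun hh => hti hh.symm
      · intro m hmm hmne
        exact hrest m (by omega) hmne
    exact ⟨a, ha, b, hb, i, by rw [pvMismD_eq, hm]; exact List.mem_singleton_self i,
      by rw [pvMismD_eq]; exact hm, by omega, Or.inr ⟨hlen, hs2, hsi, hend⟩⟩
  · obtain ⟨hs2, hlen, hend, i, hil, hsi, hti, hrest⟩ := hsp
    have hm : pvMism b.toList a.toList = [i] := by
      rw [pvMismSingleton]
      refine ⟨by omega, ?_, ?_⟩
      · rw [hsi]; exact fun hh => hti hh.symm
      · intro m hmm hmne
        exact hrest m (by omega) hmne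
    exact ⟨b, hb, a, ha, i, by rw [pvMismD_eq, hm]; exact List.mem_singleton_self i,
      by rw [pvMismD_eq]; exact hm, by omega, Or.inr ⟨hlen, hs2, hsi, hend⟩⟩

-- the core analysis, forward direction
lemma pvCoreForward (la lb : List Char) (i j : Nat) (hi : i < 3) (hj : j < 3)
    (hne : la ≠ lb) (heq : pvBlankC la i = pvBlankC lb j) (hham : pvHamN la lb = 1)
    (hnd : ¬ (pvPosAnom la lb ∨ pvSpur la lb ∨ pvSpur lb la)) :
    la.length = lb.length ∧
      ∃ δ, pvMism la lb = [δ] ∧ δ < 3 ∧ '*' ∉ la.take δ ∧ pvBlankC la i = pvBlankC la δ := by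
  rcases Nat.lt_or_ge i la.length with hi' | hi' <;> rcases Nat.lt_or_ge j lb.length with hj' | hj'
  · -- i < |la|, j < |lb| : same-length case
    have heq' : la.set i '*' = lb.set j '*' := by
      rw [← pvBlankC_lt hi', ← pvBlankC_lt hj']; exact heq
    have hlen : la.length = lb.length := by
      have := congrArg List.length heq'; simpa using this
    have hpt : ∀ m, (hm : m < la.length) →
        (if i = m then '*' else la[m]) = (if j = m then '*' else lb[m]'(by omega)) := by
      intro m hm
      calc (if i = m then '*' else la[m])
          = (la.set i '*')[m]'(by simpa using hm) := (List.getElem_set _).symm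
        _ = (lb.set j '*')[m]'(by simp; omega) := List.getElem_of_eq heq' _
        _ = (if j = m then '*' else lb[m]'(by omega)) := List.getElem_set _
    have hoff : ∀ m, (hm : m < la.length) → m ≠ i → m ≠ j → la[m] = lb[m]'(by omega) := by
      intro m hm h1 h2
      have := hpt m hm
      rwa [if_neg (by omega), if_neg (by omega)] at this
    obtain ⟨δ0, hm0⟩ := pvHamOne la lb hham
    obtain ⟨hδ0lt, hδ0ne, hδ0else⟩ := (pvMismSingleton la lb δ0).mp hm0
    have hδ0ij : δ0 = i ∨ δ0 = j := by
      by_cases hc1 : δ0 = i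
      · exact Or.inl hc1
      by_cases hc2 : δ0 = j
      · exact Or.inr hc2
      exfalso
      have hlt : δ0 < la.length := by omega
      rw [List.getD_eq_getElem _ _ hlt, List.getD_eq_getElem _ _ (by omega)] at hδ0ne
      exact hδ0ne (hoff δ0 hlt hc1 hc2)
    have hbuild : '*' ∈ la.take δ0 → False := by
      intro hstar
      exact hnd (Or.inl (pvBuildPosAnom la lb δ0 hlen (by omega) (by omega)
        hδ0ne (fun m hm hmne => hδ0else m (by omega) hmne) hstar))
    by_cases hij : i = j
    · have hδ0i : δ0 = i := by rcases hδ0ij with h | h <;> omega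
      refine ⟨hlen, δ0, hm0, by omega, fun hstar => hbuild hstar, by rw [hδ0i]⟩
    · have hlaj : la[j]'(by omega) = '*' := by
        have := hpt j (by omega)
        rwa [if_neg hij, if_pos rfl] at this
      have hlbi : lb[i]'(by omega) = '*' := by
        have := hpt i hi'
        rw [if_pos rfl, if_neg (fun hh => hij hh.symm)] at this
        exact this.symm
      rcases hδ0ij with hδ0i | hδ0j
      · refine ⟨hlen, δ0, hm0, by omega, fun hstar => hbuild hstar, by rw [hδ0i]⟩
      · -- δ0 = j : mismatch at j, so la and lb agree at i, hence la[i] = '*'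
        subst hδ0j
        have hlai : la[i]'hi' = '*' := by
          have heqi : la.getD i ' ' = lb.getD i ' ' := hδ0else i (by omega) (by omega)
          rw [List.getD_eq_getElem _ _ hi', List.getD_eq_getElem _ _ (by omega)] at heqi
          rw [heqi]; exact hlbi
        rcases Nat.lt_or_ge i δ0 with hilt | hige
        · exact absurd (List.mem_take_iff_getElem.mpr ⟨i, by omega, hlai⟩) (fun h => hbuild h)
        · refine ⟨hlen, δ0, hm0, by omega, fun hstar => hbuild hstar, ?_⟩
          rw [pvBlankC_lt hi', pvBlankC_lt (show δ0 < la.length by omega)]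
          have h1 : la.set i '*' = la := by
            apply List.ext_getElem (by simp)
            intro m hm1 hm2
            rw [List.getElem_set]
            split
            · rename_i hh; subst hh; exact hlai.symm
            · rfl
          have h2 : la.set δ0 '*' = la := by
            apply List.ext_getElem (by simp)
            intro m hm1 hm2
            rw [List.getElem_set]
            split
            · rename_i hh; subst hh; exact hlaj.symm
            · rfl
          rw [h1, h2]
  · -- i < |la|, j ≥ |lb| : would force pvSpur lb la
    exfalso
    have heq' : la.set i '*' = lb ++ ['*'] := by
      rw [← pvBlankC_lt hi', ← pvBlankC_ge hj']; exact heq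
    have hlen : la.length = lb.length + 1 := by
      have := congrArg List.length heq'; simpa using this
    have hpt : ∀ m, (hm : m < la.length) →
        (if i = m then '*' else la[m]) = (lb ++ ['*'])[m]'(by simp; omega) := by
      intro m hm
      calc (if i = m then '*' else la[m])
          = (la.set i '*')[m]'(by simpa using hm) := (List.getElem_set _).symm
        _ = (lb ++ ['*'])[m]'(by simp; omega) := List.getElem_of_eq heq' _
    obtain ⟨δ0, hm0⟩ := pvHamOne la lb hham
    obtain ⟨hδ0lt, hδ0ne, hδ0else⟩ := (pvMismSingleton la lb δ0).mp hm0
    have hmin : min la.length lb.length = lb.length := by omega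
    by_cases hilb : i = lb.length
    · have hall : ∀ m, (hm : m < lb.length) → la[m]'(by omega) = lb[m] := by
        intro m hm
        have := hpt m (by omega)
        rw [if_neg (by omega)] at this
        rw [this, List.getElem_append_left hm]
      have hδ0 : δ0 < lb.length := by omega
      rw [List.getD_eq_getElem _ _ (by omega), List.getD_eq_getElem _ _ hδ0] at hδ0ne
      exact hδ0ne (hall δ0 hδ0)
    · have hilt : i < lb.length := by omega
      have hlbi : lb[i]'hilt = '*' := by
        have := hpt i hi'
        rw [if_pos rfl, List.getElem_append_left hilt] at this
        exact this.symm
      have hlaend : la[lb.length]'(by omega) = '*' := by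
        have := hpt lb.length (by omega)
        rw [if_neg hilb] at this
        rw [this, List.getElem_append_right (le_refl _)]
        simp
      have hoff : ∀ m, (hm : m < lb.length) → m ≠ i → la[m]'(by omega) = lb[m] := by
        intro m hm hmne
        have := hpt m (by omega)
        rw [if_neg (by omega)] at this
        rw [this, List.getElem_append_left hm]
      have hδ0i : δ0 = i := by
        by_contra hc
        have hδ0 : δ0 < lb.length := by omega
        rw [List.getD_eq_getElem _ _ (by omega), List.getD_eq_getElem _ _ hδ0] at hδ0ne
        exact hδ0ne (hoff δ0 hδ0 hc)
      subst hδ0i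
      have hlaine : la[δ0]'(by omega) ≠ '*' := by
        rw [List.getD_eq_getElem _ _ (by omega : δ0 < la.length),
          List.getD_eq_getElem _ _ (by omega)] at hδ0ne
        exact fun hh => hδ0ne (by rw [hh, hlbi])
      apply hnd (Or.inr (Or.inr ?_))
      refine ⟨by omega, by omega, ?_, δ0, by omega, ?_, ?_, ?_⟩
      · rw [List.getD_eq_getElem _ _ (by omega)]; exact hlaend
      · rw [List.getD_eq_getElem _ _ (by omega)]; exact hlbi
      · rw [List.getD_eq_getElem _ _ (by omega)]; exact hlaine
      · intro m hm hmne
        rw [List.getD_eq_getElem _ _ (by omega), List.getD_eq_getElem _ _ (by omega)]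
        exact (hoff m (by omega) hmne).symm
  · -- i ≥ |la|, j < |lb| : would force pvSpur la lb
    exfalso
    have heq' : la ++ ['*'] = lb.set j '*' := by
      rw [← pvBlankC_ge hi', ← pvBlankC_lt hj']; exact heq
    have hlen : lb.length = la.length + 1 := by
      have := congrArg List.length heq'; simp at this; omega
    have hpt : ∀ m, (hm : m < lb.length) →
        (la ++ ['*'])[m]'(by simp; omega) = (if j = m then '*' else lb[m]) := by
      intro m hm
      calc (la ++ ['*'])[m]'(by simp; omega)
          = (lb.set j '*')[m]'(by simpa using hm) := List.getElem_of_eq heq' _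
        _ = (if j = m then '*' else lb[m]) := List.getElem_set _
    obtain ⟨δ0, hm0⟩ := pvHamOne la lb hham
    obtain ⟨hδ0lt, hδ0ne, hδ0else⟩ := (pvMismSingleton la lb δ0).mp hm0
    have hmin : min la.length lb.length = la.length := by omega
    by_cases hjla : j = la.length
    · have hall : ∀ m, (hm : m < la.length) → la[m] = lb[m]'(by omega) := by
        intro m hm
        have := hpt m (by omega)
        rw [if_neg (by omega), List.getElem_append_left hm] at this
        exact this
      have hδ0 : δ0 < la.length := by omega
      rw [List.getD_eq_getElem _ _ hδ0, List.getD_eq_getElem _ _ (by omega)] at hδ0ne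
      exact hδ0ne (hall δ0 hδ0)
    · have hjlt : j < la.length := by omega
      have hlaj : la[j]'hjlt = '*' := by
        have := hpt j (by omega)
        rw [if_pos rfl, List.getElem_append_left hjlt] at this
        exact this
      have hlbend : lb[la.length]'(by omega) = '*' := by
        have := hpt la.length (by omega)
        rw [if_neg hjla, List.getElem_append_right (le_refl _)] at this
        simpa using this.symm
      have hoff : ∀ m, (hm : m < la.length) → m ≠ j → la[m] = lb[m]'(by omega) := by
        intro m hm hmne
        have := hpt m (by omega)
        rw [if_neg (by omega), List.getElem_append_left hm] at this
        exact this
      have hδ0j : δ0 = j := by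
        by_contra hc
        have hδ0 : δ0 < la.length := by omega
        rw [List.getD_eq_getElem _ _ hδ0, List.getD_eq_getElem _ _ (by omega)] at hδ0ne
        exact hδ0ne (hoff δ0 hδ0 hc)
      subst hδ0j
      have hlbne : lb[δ0]'(by omega) ≠ '*' := by
        rw [List.getD_eq_getElem _ _ (by omega : δ0 < la.length),
          List.getD_eq_getElem _ _ (by omega)] at hδ0ne
        exact fun hh => hδ0ne (by rw [hh, hlaj])
      apply hnd (Or.inr (Or.inl ?_))
      refine ⟨by omega, by omega, ?_, δ0, by omega, ?_, ?_, ?_⟩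
      · rw [List.getD_eq_getElem _ _ (by omega)]; exact hlbend
      · rw [List.getD_eq_getElem _ _ (by omega)]; exact hlaj
      · rw [List.getD_eq_getElem _ _ (by omega)]; exact hlbne
      · intro m hm hmne
        rw [List.getD_eq_getElem _ _ (by omega), List.getD_eq_getElem _ _ (by omega)]
        exact hoff m (by omega) hmne
  · -- i ≥ |la|, j ≥ |lb| : then la = lb, contradiction
    exfalso
    have heq' : la ++ ['*'] = lb ++ ['*'] := by
      rw [← pvBlankC_ge hi', ← pvBlankC_ge hj']; exact heq
    exact hne (List.append_cancel_right heq')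

lemma pvCoreBackward (la lb : List Char) (δ : Nat) (hlen : la.length = lb.length)
    (hm : pvMism la lb = [δ]) (hδ : δ < 3) (hnd : ¬ pvPosAnom la lb) :
    pvBlankC la δ = pvBlankC lb δ ∧ '*' ∉ la.take δ := by
  obtain ⟨h1, h2, h3⟩ := (pvMismSingleton la lb δ).mp hm
  have hδla : δ < la.length := by omega
  constructor
  · rw [pvBlankC_lt hδla, pvBlankC_lt (show δ < lb.length by omega)]
    apply List.ext_getElem (by simp [hlen])
    intro m hm1 hm2
    rw [List.getElem_set, List.getElem_set]
    by_cases hh : δ = m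
    · rw [if_pos hh, if_pos hh]
    · rw [if_neg hh, if_neg hh]
      have hmlt : m < la.length := by simpa using hm1
      have := h3 m (by omega) (by omega)
      rwa [List.getD_eq_getElem _ _ hmlt, List.getD_eq_getElem _ _ (by omega)] at this
  · intro hstar
    exact hnd ⟨hlen, δ, hδ, hδla,
      (pvTakeDropEq la lb δ hlen (fun m hmm hmne => h3 m (by omega) hmne)).1,
      (pvTakeDropEq la lb δ hlen (fun m hmm hmne => h3 m (by omega) hmne)).2, h2, hstar⟩

-- ---- main membership equivalence ----
lemma pvMemIff (roots : List String) (hnd : ¬ D_find_single_substitution_pairs roots)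
    (t : String × String × Int) : t ∈ pvSA roots ↔ t ∈ pvLB roots := by
  rw [pvMem_SA, pvMem_LB]
  constructor
  · rintro ⟨a, b, k, ha, hb, ⟨i, hi, hik⟩, ⟨j, hj, hjk⟩, hab, hham, rfl⟩
    have hne : a.toList ≠ b.toList := ne_of_lt hab
    have hndp : ¬ (pvPosAnom a.toList b.toList ∨ pvSpur a.toList b.toList ∨ pvSpur b.toList a.toList) :=
      fun hcon => hnd (pvClauseD roots a b ha hb hcon)
    have hkeq : pvBlankC a.toList i = pvBlankC b.toList j := by
      rw [← pvBlankA_toList, ← pvBlankA_toList, hik, hjk]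
    have hham' : pvHamN a.toList b.toList = 1 := by
      rw [pvHamA_eq] at hham; exact_mod_cast hham
    obtain ⟨hlen, δ, hmism, hδ3, hstar, hkey⟩ :=
      pvCoreForward a.toList b.toList i j hi hj hne hkeq hham' hndp
    have hδmem : δ ∈ pvMism a.toList b.toList := by rw [hmism]; exact List.mem_singleton_self δ
    have hδlen : δ ≤ a.toList.length := by
      unfold pvMism at hδmem
      have := List.mem_range.mp (List.mem_filter.mp hδmem).1
      omega
    have hkval : k = pvBlankA a (δ : Int) := by
      rw [← String.toList_inj, pvBlankA_toList, ← hkey, ← pvBlankA_toList, hik]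
    refine ⟨a, b, δ, ha, hb, hab, hlen, ?_, hδ3, ?_⟩
    · rw [pvDiffsB_eq_mism _ _ hlen]; exact hmism
    · rw [hkval, pvPosOfKey a δ hδlen hstar]
  · rintro ⟨a, b, δ, ha, hb, hab, hlen, hdiffs, hδ, rfl⟩
    have hne : a.toList ≠ b.toList := ne_of_lt hab
    have hndp : ¬ pvPosAnom a.toList b.toList :=
      fun hcon => hnd (pvClauseD roots a b ha hb (Or.inl hcon))
    have hmism : pvMism a.toList b.toList = [δ] := by
      rw [← pvDiffsB_eq_mism _ _ hlen]; exact hdiffs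
    obtain ⟨hkeq, hstar⟩ := pvCoreBackward a.toList b.toList δ hlen hmism hδ hndp
    have hδmem : δ ∈ pvMism a.toList b.toList := by rw [hmism]; exact List.mem_singleton_self δ
    have hδlen : δ ≤ a.toList.length := by
      unfold pvMism at hδmem
      have := List.mem_range.mp (List.mem_filter.mp hδmem).1
      omega
    have hham : pvHamA a b = 1 := by
      rw [pvHamA_eq, pvHamN_eq_mism, hmism]
      rfl
    refine ⟨a, b, pvBlankA a (δ : Int), ha, hb, ⟨δ, hδ, rfl⟩, ⟨δ, hδ, ?_⟩, hab, hham, ?_⟩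
    · rw [← String.toList_inj, pvBlankA_toList, pvBlankA_toList, hkeq]
    · rw [pvPosOfKey a δ hδlen hstar]

lemma pvA_eq (roots : List String) : find_single_substitution_pairs roots = pvSortTriples (pvSA roots) := rfl

lemma pvSortTriplesB_eq (l : List (String × String × Int)) : pvSortTriplesB l = pvSortTriples l := rfl

lemma pvB_eq (roots : List String) : find_single_substitution_pairs_alt roots = pvSortTriples (pvLB roots) := by
  unfold find_single_substitution_pairs_alt pvLB pvSR
  dsimp only
  rw [pvSortTriplesB_eq]
  congr 1
  rw [PySem.List.foldl_congr_mem _ _ (fun acc c => acc ++ pvEmitB c) _ ?_]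
  · rw [PySem.List.foldl_append_eq_flatMap, List.nil_append]
  · intro acc c _
    rcases c with _ | ⟨a, _ | ⟨b, _ | rest⟩⟩ <;> simp only [pvEmitB]
    · simp
    · simp
    · split
      · simp
      · split
        · split <;> simp
        · simp
    · simp

-- ===== VERDICT (by name: the statement is the Claim_ definition above) =====
theorem find_single_substitution_pairs_spec : Claim_unchanged_find_single_substitution_pairs := by
  intro roots _dom hnd
  rw [pvA_eq, pvB_eq]
  exact pvSortTriples_congr_perm
    ((List.perm_ext_iff_of_nodup (pvNodup_SA roots) (pvNodup_LB roots)).mpr (pvMemIff roots hnd))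

theorem find_single_substitution_pairs_changed : Claim_changed_find_single_substitution_pairs := by
  unfold Claim_changed_find_single_substitution_pairs; decide
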